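-- pv_equiv track=rewrite | github.com/baiwan-chenhao/rewrite | leetcode_gen_week1.py | solve
-- ===== SOURCE A (Python) =====
-- from typing import List, Tuple
--
-- def solve(skill: List[int], mana: List[int]) -> int:
--     n = len(skill)
--     last_finish = [0] * n  # 第 i 名巫师完成上一瓶药水的时间
--     for m in mana:
--         # 按题意模拟
--         sum_t = 0
--         for x, last in zip(skill, last_finish):
--             if last > sum_t: sum_t = last  # 手写 max
--             sum_t += x * m
--         # 倒推：如果酿造药水的过程中没有停顿，那么 last_finish[i] 应该是多少
--         last_finish[-1] = sum_t
--         for i in range(n - 2, -1, -1):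
--             last_finish[i] = last_finish[i + 1] - skill[i + 1] * m
--     return last_finish[-1]
-- ===== SOURCE B (Python) =====
-- from typing import List
--
-- def solve(skill: List[int], mana: List[int]) -> int:
--     prefix = []
--     p = 0
--     for x in skill:
--         prefix.append(p)
--         p += x
--     done = [0] * len(skill)
--     for m in mana:
--         start = 0
--         for d, pf in zip(done, prefix):
--             start = max(start, d - pf * m)
--         done = [start + (pf + x) * m for pf, x in zip(prefix, skill)]
--     return done[-1]
-- ===== Notes on version B (the rewrite author's own statement) =====
-- stated objective: alternative
-- what changed: B precomputes a prefix-sum table of skill once and, for each mana, computes the batch start time directly (max of done[i] - prefix[i]*m) and regenerates all finish times forward in one map, replacing A's running-sum forward pass followed by a backward reconstruction loop that subtracts skill[i+1]*m element by element.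
import Mathlib
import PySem

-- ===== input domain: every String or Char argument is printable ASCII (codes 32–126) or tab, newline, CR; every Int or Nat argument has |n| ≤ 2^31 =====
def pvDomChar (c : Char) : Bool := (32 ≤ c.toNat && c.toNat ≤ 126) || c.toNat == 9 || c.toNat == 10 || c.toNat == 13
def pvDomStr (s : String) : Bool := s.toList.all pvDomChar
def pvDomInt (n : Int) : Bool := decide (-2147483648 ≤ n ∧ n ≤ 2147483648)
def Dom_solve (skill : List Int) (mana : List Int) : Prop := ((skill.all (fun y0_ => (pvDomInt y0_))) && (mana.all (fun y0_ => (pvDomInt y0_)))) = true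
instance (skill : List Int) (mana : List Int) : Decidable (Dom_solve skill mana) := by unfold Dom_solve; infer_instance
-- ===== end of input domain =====

-- B replaces A's per-potion forward-max pass plus backward reconstruction loop by a
-- precomputed prefix-sum table and a direct forward recomputation of the finish times
-- (objective: alternative decomposition, same asymptotic cost). Return value only.

-- ===== PORT A =====
-- the backward loop: last[n-1] = sum_t; last[i] = last[i+1] - skill[i+1]*m
def backA (m : Int) : List Int → Int → List Int
  | [], _ => []
  | [_], s => [s]
  | _ :: y :: rest, s =>
      let tail := backA m (y :: rest) s
      (tail.headD 0 - y * m) :: tail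

-- one iteration of A's outer loop over mana
def stepA (skill : List Int) (m : Int) (last : List Int) : List Int :=
  let sum_t := (skill.zip last).foldl
    (fun s p => (if p.2 > s then p.2 else s) + p.1 * m) 0
  backA m skill sum_t

def solve (skill : List Int) (mana : List Int) : Int :=
  let final := mana.foldl (fun last m => stepA skill m last) (List.replicate skill.length 0)
  (PySem.List.pyGet? final (-1)).getD 0    -- last_finish[-1]; none = IndexError (skill = [])

-- ===== PORT B =====
-- prefix built by the first loop of Source B
def prefixesB (skill : List Int) : List Int :=
  (skill.foldl (fun (acc : List Int × Int) x => (acc.1 ++ [acc.2], acc.2 + x)) ([], 0)).1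

-- one iteration of B's loop over mana
def stepB (pre skill : List Int) (m : Int) (done : List Int) : List Int :=
  let start := (done.zip pre).foldl (fun s p => max s (p.1 - p.2 * m)) 0
  (pre.zip skill).map (fun p => start + (p.1 + p.2) * m)

def solve_alt (skill : List Int) (mana : List Int) : Int :=
  let pre := prefixesB skill
  let final := mana.foldl (fun done m => stepB pre skill m done) (List.replicate skill.length 0)
  (PySem.List.pyGet? final (-1)).getD 0    -- done[-1]; none = IndexError (skill = [])

-- ===== PRECONDITION & SPEC =====
-- Pre_ excludes exactly skill = [], on which Python A raises IndexError (last_finish[-1]).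
def Pre_solve (skill : List Int) (mana : List Int) : Prop := skill ≠ []
instance (skill : List Int) (mana : List Int) : Decidable (Pre_solve skill mana) := by unfold Pre_solve; infer_instance
def pvWitness_solve : List Int × List Int := ([1, 5, 2], [4, 1, 2])

def Spec_solve (skill : List Int) (mana : List Int) (out : Int) : Prop := out = solve_alt skill mana
instance (skill : List Int) (mana : List Int) (out : Int) : Decidable (Spec_solve skill mana out) := by unfold Spec_solve; infer_instance

-- ===== CLAIM (what is proved, stated in full; the proofs are below) =====
def Claim_equal_solve : Prop := ∀ (skill : List Int) (mana : List Int), Dom_solve skill mana → Pre_solve skill mana → Spec_solve skill mana (solve skill mana)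

-- ===== LEMMAS AND PROOFS =====

-- prefix sums starting at accumulated value c (mathematical form of prefixesB)
def preFrom (c : Int) : List Int → List Int
  | [] => []
  | x :: xs => c :: preFrom (c + x) xs

theorem preFrom_length (c : Int) (xs : List Int) : (preFrom c xs).length = xs.length := by
  induction xs generalizing c with
  | nil => rfl
  | cons x xs ih => simp [preFrom, ih]

theorem prefixesB_foldl (xs : List Int) (acc : List Int) (c : Int) :
    (xs.foldl (fun (a : List Int × Int) x => (a.1 ++ [a.2], a.2 + x)) (acc, c))
      = (acc ++ preFrom c xs, c + xs.sum) := by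
  induction xs generalizing acc c with
  | nil => simp [preFrom]
  | cons x xs ih => simp [preFrom, ih]; ring

theorem prefixesB_eq (skill : List Int) : prefixesB skill = preFrom 0 skill := by
  simp [prefixesB, prefixesB_foldl]

-- A's forward pass equals B's start-fold plus the total work of the batch
theorem fwd_eq (skill : List Int) : ∀ (last : List Int), last.length = skill.length →
    ∀ (m s c : Int),
    (skill.zip last).foldl (fun s p => (if p.2 > s then p.2 else s) + p.1 * m) s
      = (last.zip (preFrom c skill)).foldl (fun t p => max t (p.1 - p.2 * m)) (s - c * m)
          + (c + skill.sum) * m := by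
  induction skill with
  | nil =>
    intro last h m s c
    simp at h; subst h
    simp only [List.zip_nil_left, List.foldl_nil, List.sum_nil]
    ring
  | cons x xs ih =>
    intro last h m s c
    cases last with
    | nil => simp at h
    | cons l ls =>
      simp at h
      simp only [List.zip_cons_cons, List.foldl_cons, preFrom]
      rw [ih ls h m ((if l > s then l else s) + x * m) (c + x)]
      have h1 : (if l > s then l else s) = max s l := by omega
      have h2 : max (s - c * m) (l - c * m) = max s l - c * m :=
        max_sub_sub_right s l (c * m)
      have h3 : max s l + x * m - (c + x) * m = max s l - c * m := by ring
      rw [h1, h3, ← h2]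
      simp only [List.sum_cons]
      congr 1
      ring

-- A's backward reconstruction is B's forward map
theorem backA_eq (m : Int) : ∀ (skill : List Int), skill ≠ [] → ∀ (s c : Int),
    backA m skill s
      = ((preFrom c skill).zip skill).map
          (fun p => (s - (c + skill.sum) * m) + (p.1 + p.2) * m) := by
  intro skill
  induction skill with
  | nil => intro h; exact absurd rfl h
  | cons x xs ih =>
    intro _ s c
    cases xs with
    | nil => simp [backA, preFrom]
    | cons y rest =>
      have hne : (y :: rest : List Int) ≠ [] := by simp
      simp only [backA]
      rw [ih hne s (c + x)]
      simp only [preFrom, List.zip_cons_cons, List.map_cons, List.headD_cons,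
        List.sum_cons]
      have hc : c + x + (y + rest.sum) = c + (x + (y + rest.sum)) := by ring
      rw [hc]
      simp only [List.cons.injEq]
      exact ⟨by ring, trivial⟩

theorem stepB_length (pre skill : List Int) (m : Int) (done : List Int) :
    (stepB pre skill m done).length = min pre.length skill.length := by
  simp [stepB]

-- one outer iteration: A's step = B's step (on states of the right length)
theorem step_eq (skill : List Int) (hne : skill ≠ []) (m : Int) (last : List Int)
    (h : last.length = skill.length) :
    stepA skill m last = stepB (preFrom 0 skill) skill m last := by
  unfold stepA stepB
  rw [fwd_eq skill last h m 0 0]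
  rw [backA_eq m skill hne _ 0]
  have h0 : (0 : Int) - 0 * m = 0 := by ring
  rw [h0]
  apply List.map_congr_left
  intro p _
  ring

theorem fold_eq (skill : List Int) (hne : skill ≠ []) :
    ∀ (mana : List Int) (st : List Int), st.length = skill.length →
    mana.foldl (fun last m => stepA skill m last) st
      = mana.foldl (fun done m => stepB (prefixesB skill) skill m done) st := by
  intro mana
  induction mana with
  | nil => intro st _; rfl
  | cons m ms ih =>
    intro st h
    simp only [List.foldl_cons]
    have hstep : stepA skill m st = stepB (prefixesB skill) skill m st := by
      rw [prefixesB_eq]; exact step_eq skill hne m st h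
    rw [← hstep]
    exact ih _ (by rw [hstep, stepB_length, prefixesB_eq, preFrom_length]; omega)

-- ===== VERDICT (by name: the statement is the Claim_ definition above) =====
theorem solve_spec : Claim_equal_solve := by
  intro skill mana _ hpre
  unfold Spec_solve solve solve_alt
  rw [fold_eq skill hpre mana _ (by simp)]
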